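-- pv_equiv track=rewrite | github.com/withNoclout/LeetCode-Med | quiz_countCell.py | _get_covered_indices
-- ===== SOURCE A (Python) =====
-- def _get_covered_indices(text, pattern):
--     """
--     Returns a boolean array where arr[i] is True if text[i] is part of any occurrence of pattern.
--     """
--     n = len(text)
--     p = len(pattern)
--     if p > n:
--         return [False] * n
--
--     # KMP Step 1: Build PI table (LPS array)
--     pi = [0] * p
--     j = 0
--     for i in range(1, p):
--         while j > 0 and pattern[i] != pattern[j]:
--             j = pi[j-1]
--         if pattern[i] == pattern[j]:
--             j += 1
--         pi[i] = j
--
--     # KMP Step 2: Find all start indices of matches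
--     matches_start = []
--     j = 0
--     for i, char in enumerate(text):
--         while j > 0 and char != pattern[j]:
--             j = pi[j-1]
--         if char == pattern[j]:
--             j += 1
--         if j == p:
--             matches_start.append(i - p + 1)
--             j = pi[j-1]
--
--     # Step 3: Use Difference Array to mark covered ranges in O(N)
--     diff = [0] * (n + 1)
--     for start in matches_start:
--         diff[start] += 1
--         if start + p <= n:
--             diff[start + p] -= 1
--
--     is_covered = [False] * n
--     current_overlap = 0
--     for i in range(n):
--         current_overlap += diff[i]
--         if current_overlap > 0:
--             is_covered[i] = True
--
--     return is_covered
-- ===== SOURCE B (Python) =====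
-- def _get_covered_indices(text, pattern):
--     """
--     Returns a boolean array where arr[i] is True if text[i] is part of any occurrence of pattern.
--     Same KMP matching as before; marks each matched range directly instead of via a
--     difference array and prefix-sum pass.
--     """
--     n = len(text)
--     p = len(pattern)
--     if p > n:
--         return [False] * n
--
--     # KMP Step 1: Build PI table (LPS array)
--     pi = [0] * p
--     j = 0
--     for i in range(1, p):
--         while j > 0 and pattern[i] != pattern[j]:
--             j = pi[j-1]
--         if pattern[i] == pattern[j]:
--             j += 1
--         pi[i] = j
--
--     # KMP scan: on each full match, mark the covered range directly
--     is_covered = [False] * n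
--     j = 0
--     for i, char in enumerate(text):
--         while j > 0 and char != pattern[j]:
--             j = pi[j-1]
--         if char == pattern[j]:
--             j += 1
--         if j == p:
--             for k in range(i - p + 1, i + 1):
--                 is_covered[k] = True
--             j = pi[j-1]
--
--     return is_covered
-- ===== Notes on version B (the rewrite author's own statement) =====
-- stated objective: simpler
-- what changed: The difference-array + running-sum marking pass (Step 3) is removed: B keeps the same KMP matching but, on each full match, marks the covered index range directly in the boolean array, so the matches_start list, the diff array and the prefix-sum loop all disappear.
import Mathlib
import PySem

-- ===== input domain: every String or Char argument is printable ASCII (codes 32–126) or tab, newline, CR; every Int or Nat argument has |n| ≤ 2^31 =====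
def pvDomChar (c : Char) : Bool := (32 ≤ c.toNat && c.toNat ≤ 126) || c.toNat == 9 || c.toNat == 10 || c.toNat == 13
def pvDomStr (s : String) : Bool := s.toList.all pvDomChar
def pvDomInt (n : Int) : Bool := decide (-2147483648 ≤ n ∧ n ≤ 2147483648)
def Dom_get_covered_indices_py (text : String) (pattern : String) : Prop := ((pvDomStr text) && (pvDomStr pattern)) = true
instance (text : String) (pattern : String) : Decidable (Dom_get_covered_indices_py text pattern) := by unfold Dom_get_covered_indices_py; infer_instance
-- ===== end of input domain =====

-- B replaces A's difference-array + prefix-sum marking (Step 3) by marking each matched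
-- range directly during the (identical) KMP scan; objective: simpler, not faster.

-- ===== PORT A =====
-- shared KMP helpers (both Python versions contain this code verbatim):
-- the inner `while j > 0 and c != pattern[j]: j = pi[j-1]`, fuel = initial j
-- (the table always satisfies pi[j-1] < j, so the fuel only makes the loop total).
def kmpFall (pat : List Char) (tbl : List Nat) (c : Char) : Nat → Nat → Nat
  | j, 0 => j
  | j, fuel+1 =>
    if 0 < j ∧ c ≠ pat.getD j ' ' then kmpFall pat tbl c (tbl.getD (j-1) 0) fuel else j

-- the while loop followed by `if c == pattern[j]: j += 1`
def kmpStep (pat : List Char) (tbl : List Nat) (j : Nat) (c : Char) : Nat :=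
  let j1 := kmpFall pat tbl c j j
  if c = pat.getD j1 ' ' then j1 + 1 else j1

-- KMP Step 1: pi table (`for i in range(1, p)` over state (pi, j))
def buildPi (pat : List Char) : List Nat :=
  ((List.range' 1 (pat.length - 1)).foldl
    (fun (st : List Nat × Nat) i =>
      let j := kmpStep pat st.1 st.2 (pat.getD i ' ')
      (st.1.set i j, j))
    (List.replicate pat.length 0, 0)).1

def get_covered_indices_py (text : String) (pattern : String) : List Bool :=
  let t := text.toList
  let pat := pattern.toList
  let n := t.length
  let p := pat.length
  if p > n then List.replicate n false else
  let tbl := buildPi pat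
  -- KMP Step 2: collect match start indices (for i, char in enumerate(text))
  let scan := t.zipIdx.foldl
    (fun (st : List Nat × Nat) ci =>
      let j := kmpStep pat tbl st.2 ci.1
      if j = p then (st.1 ++ [ci.2 + 1 - p], tbl.getD (j-1) 0) else (st.1, j))
    ([], 0)
  -- Step 3: difference array
  let diff := scan.1.foldl
    (fun (d : List Int) s =>
      let d1 := d.set s (d.getD s 0 + 1)
      if s + p ≤ n then d1.set (s+p) (d1.getD (s+p) 0 - 1) else d1)
    (List.replicate (n+1) 0)
  -- running sum
  ((List.range n).foldl
    (fun (st : List Bool × Int) i =>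
      let cur := st.2 + diff.getD i 0
      (if 0 < cur then st.1.set i true else st.1, cur))
    (List.replicate n false, 0)).1

-- ===== PORT B =====
def get_covered_indices_py_alt (text : String) (pattern : String) : List Bool :=
  let t := text.toList
  let pat := pattern.toList
  let n := t.length
  let p := pat.length
  if p > n then List.replicate n false else
  let tbl := buildPi pat
  -- same KMP scan; on each full match mark range(i-p+1, i+1) directly
  (t.zipIdx.foldl
    (fun (st : List Bool × Nat) ci =>
      let j := kmpStep pat tbl st.2 ci.1
      if j = p then
        ((List.range' (ci.2 + 1 - p) p).foldl (fun cov k => cov.set k true) st.1,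
         tbl.getD (j-1) 0)
      else (st.1, j))
    (List.replicate n false, 0)).1

-- ===== PRECONDITION & SPEC =====
-- Pre_ excludes only the inputs where the Python A raises IndexError: an empty pattern
-- with nonempty text (pattern[j] with j = 0 on an empty string); B raises there too.
def Pre_get_covered_indices_py (text : String) (pattern : String) : Prop :=
  pattern ≠ "" ∨ text = ""
instance (text : String) (pattern : String) : Decidable (Pre_get_covered_indices_py text pattern) := by
  unfold Pre_get_covered_indices_py; infer_instance

def pvWitness_get_covered_indices_py : String × String := ("ababa", "aba")

def Spec_get_covered_indices_py (text : String) (pattern : String) (out : List Bool) : Prop := out = get_covered_indices_py_alt text pattern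
instance (text : String) (pattern : String) (out : List Bool) : Decidable (Spec_get_covered_indices_py text pattern out) := by unfold Spec_get_covered_indices_py; infer_instance

-- ===== CLAIM (what is proved, stated in full; the proofs are below) =====
def Claim_equal_get_covered_indices_py : Prop := ∀ (text : String) (pattern : String), Dom_get_covered_indices_py text pattern → Pre_get_covered_indices_py text pattern → Spec_get_covered_indices_py text pattern (get_covered_indices_py text pattern)

-- ===== LEMMAS AND PROOFS =====

def markRange (cov : List Bool) (s p : Nat) : List Bool :=
  (List.range' s p).foldl (fun c k => c.set k true) cov

def markAll (cov : List Bool) (ms : List Nat) (p : Nat) : List Bool :=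
  ms.foldl (fun c s => markRange c s p) cov

theorem getD_set' {α : Type} (d : List α) (a k : Nat) (v dft : α) :
    (d.set a v).getD k dft = if k = a ∧ a < d.length then v else d.getD k dft := by
  simp only [List.getD_eq_getElem?_getD, List.getElem?_set]
  split_ifs with h1 h2 h3 h4 <;> simp_all

theorem getD_replicate' {α : Type} (n i : Nat) (v dft : α) :
    (List.replicate n v).getD i dft = if i < n then v else dft := by
  simp only [List.getD_eq_getElem?_getD, List.getElem?_replicate]
  split_ifs <;> simp

theorem markRange_length (cov : List Bool) (s p : Nat) :
    (markRange cov s p).length = cov.length := by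
  induction p generalizing s cov with
  | zero => simp [markRange]
  | succ p ih =>
    simp only [markRange, List.range'_succ, List.foldl_cons]
    rw [show ((List.range' (s+1) p).foldl (fun c k => c.set k true) (cov.set s true)) = markRange (cov.set s true) (s+1) p from rfl, ih]
    simp

theorem markRange_getD (cov : List Bool) (s p i : Nat) :
    (markRange cov s p).getD i false
      = (cov.getD i false || decide (s ≤ i ∧ i < s + p ∧ i < cov.length)) := by
  induction p generalizing s cov with
  | zero => simp [markRange]; omega
  | succ p ih =>
    simp only [markRange, List.range'_succ, List.foldl_cons]
    rw [show ((List.range' (s+1) p).foldl (fun c k => c.set k true) (cov.set s true)) = markRange (cov.set s true) (s+1) p from rfl, ih]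
    rw [getD_set']
    simp only [List.length_set]
    by_cases hi : i = s ∧ s < cov.length
    · rw [if_pos hi]
      have h1 : s ≤ i ∧ i < s + (p+1) ∧ i < cov.length := by omega
      simp [h1]
    · simp only [if_neg hi]
      congr 1
      simp only [decide_eq_decide]
      omega

theorem markAll_length (cov : List Bool) (ms : List Nat) (p : Nat) :
    (markAll cov ms p).length = cov.length := by
  induction ms generalizing cov with
  | nil => rfl
  | cons s ms ih => simp only [markAll, List.foldl_cons]
                    rw [show (ms.foldl (fun c s => markRange c s p) (markRange cov s p)) = markAll (markRange cov s p) ms p from rfl, ih, markRange_length]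

theorem markAll_getD (cov : List Bool) (ms : List Nat) (p i : Nat) :
    (markAll cov ms p).getD i false
      = (cov.getD i false || decide (∃ s ∈ ms, s ≤ i ∧ i < s + p ∧ i < cov.length)) := by
  induction ms generalizing cov with
  | nil => simp [markAll]
  | cons s ms ih =>
    simp only [markAll, List.foldl_cons]
    rw [show (ms.foldl (fun c s => markRange c s p) (markRange cov s p)) = markAll (markRange cov s p) ms p from rfl, ih, markRange_getD, markRange_length]
    rw [Bool.or_assoc, ← Bool.decide_or]
    congr 1
    simp only [decide_eq_decide, List.mem_cons]
    constructor
    · rintro (h | ⟨t, ht, h⟩)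
      · exact ⟨s, Or.inl rfl, h⟩
      · exact ⟨t, Or.inr ht, h⟩
    · rintro ⟨t, (rfl | ht), h⟩
      · exact Or.inl h
      · exact Or.inr ⟨t, ht, h⟩

def psum (d : List Int) (m : Nat) : Int := ((List.range m).map (fun k => d.getD k 0)).sum

theorem psum_succ (d : List Int) (m : Nat) : psum d (m+1) = psum d m + d.getD m 0 := by
  simp [psum, List.range_succ]

theorem psum_set (d : List Int) (a : Nat) (v : Int) (m : Nat) (ha : a < d.length) :
    psum (d.set a v) m = psum d m + (if a < m then v - d.getD a 0 else 0) := by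
  induction m with
  | zero => simp [psum]
  | succ m ih =>
    rw [psum_succ, psum_succ, ih, getD_set']
    by_cases hma : m = a
    · subst hma; split_ifs <;> omega
    · split_ifs <;> omega

theorem psum_replicate_zero (n m : Nat) : psum (List.replicate n (0:Int)) m = 0 := by
  induction m with
  | zero => rfl
  | succ m ih => rw [psum_succ, ih, getD_replicate']; split_ifs <;> simp

def diffStep (p n : Nat) (d : List Int) (s : Nat) : List Int :=
  let d1 := d.set s (d.getD s 0 + 1)
  if s + p ≤ n then d1.set (s+p) (d1.getD (s+p) 0 - 1) else d1

-- the diff-array fold of port A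
theorem diff_psum (p n : Nat) : ∀ (ms : List Nat) (d : List Int) (m : Nat),
    (∀ s ∈ ms, s + p ≤ n) → d.length = n+1 →
    psum (ms.foldl (diffStep p n) d) m
      = psum d m + (ms.countP (fun s => decide (s < m)) : Int)
          - (ms.countP (fun s => decide (s + p < m)) : Int) := by
  intro ms
  induction ms with
  | nil => intro d m _ _; simp
  | cons s ms ih =>
    intro d m hb hd
    have hs : s + p ≤ n := hb s (List.mem_cons_self ..)
    have hslen : s < d.length := by omega
    have hsp : s + p < (d.set s (d.getD s 0 + 1)).length := by
      simp only [List.length_set]; omega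
    simp only [List.foldl_cons, diffStep, if_pos hs]
    rw [ih _ m (fun t ht => hb t (List.mem_cons_of_mem _ ht)) (by simp [hd])]
    rw [psum_set _ _ _ _ hsp, psum_set _ _ _ _ hslen]
    simp only [List.countP_cons]
    push_cast
    split_ifs <;> simp only [decide_eq_true_eq] at * <;> omega

theorem count_sub (ms : List Nat) (i p : Nat) :
    (ms.countP (fun s => decide (s < i+1)) : Int) - (ms.countP (fun s => decide (s + p < i+1)) : Int)
      = (ms.countP (fun s => decide (s ≤ i ∧ i < s + p)) : Int) := by
  induction ms with
  | nil => simp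
  | cons s ms ih =>
    simp only [List.countP_cons]
    push_cast
    split_ifs <;> simp only [decide_eq_true_eq] at * <;> omega


-- named step functions (proof-side only; definitionally the lambdas of the ports)
def sumStep (diff : List Int) (st : List Bool × Int) (i : Nat) : List Bool × Int :=
  let cur := st.2 + diff.getD i 0
  (if 0 < cur then st.1.set i true else st.1, cur)

theorem final_fold (diff : List Int) (n : Nat) : ∀ (m : Nat),
    ((List.range m).foldl (sumStep diff) (List.replicate n false, 0)).2 = psum diff m ∧
    ((List.range m).foldl (sumStep diff) (List.replicate n false, 0)).1.length = n ∧
    ∀ i, ((List.range m).foldl (sumStep diff) (List.replicate n false, 0)).1.getD i false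
        = decide (i < m ∧ 0 < psum diff (i+1) ∧ i < n) := by
  intro m
  induction m with
  | zero =>
    refine ⟨rfl, by simp, fun i => ?_⟩
    simp only [List.range_zero, List.foldl_nil]
    rw [getD_replicate']
    simp
  | succ m ih =>
    obtain ⟨ih2, ihlen, ihget⟩ := ih
    simp only [List.range_succ, List.foldl_append, List.foldl_cons, List.foldl_nil]
    rw [show ∀ st : List Bool × Int, sumStep diff st m
          = (if 0 < st.2 + diff.getD m 0 then st.1.set m true else st.1, st.2 + diff.getD m 0)
        from fun _ => rfl]
    rw [ih2, ← psum_succ]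
    refine ⟨rfl, ?_, fun i => ?_⟩
    · split_ifs
      · rw [List.length_set]; exact ihlen
      · exact ihlen
    · by_cases hpos : 0 < psum diff (m+1)
      · rw [if_pos hpos, getD_set', ihlen, ihget]
        by_cases him : i = m
        · subst him
          by_cases hin : i < n
          · simp [hin, hpos]
          · simp [hin]
        · simp only [him, false_and, if_false]
          rw [decide_eq_decide]
          omega
      · rw [if_neg hpos, ihget, decide_eq_decide]
        constructor
        · rintro ⟨h1, h2, h3⟩; exact ⟨by omega, h2, h3⟩
        · rintro ⟨h1, h2, h3⟩
          refine ⟨?_, h2, h3⟩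
          rcases Nat.lt_succ_iff_lt_or_eq.mp h1 with h | h
          · exact h
          · subst h; exact absurd h2 hpos

def scanStepA (pat : List Char) (tbl : List Nat) (p : Nat) (st : List Nat × Nat) (ci : Char × Nat) : List Nat × Nat :=
  let j := kmpStep pat tbl st.2 ci.1
  if j = p then (st.1 ++ [ci.2 + 1 - p], tbl.getD (j-1) 0) else (st.1, j)

def scanStepB (pat : List Char) (tbl : List Nat) (p : Nat) (st : List Bool × Nat) (ci : Char × Nat) : List Bool × Nat :=
  let j := kmpStep pat tbl st.2 ci.1
  if j = p then
    ((List.range' (ci.2 + 1 - p) p).foldl (fun cov k => cov.set k true) st.1, tbl.getD (j-1) 0)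
  else (st.1, j)

theorem markAll_append_singleton (cov : List Bool) (ms : List Nat) (s p : Nat) :
    markAll cov (ms ++ [s]) p = markRange (markAll cov ms p) s p := by
  simp [markAll, List.foldl_append]

theorem scan_bridge (pat : List Char) (tbl : List Nat) (p : Nat) :
    ∀ (l : List (Char × Nat)) (j : Nat) (ms : List Nat) (cov : List Bool),
    l.foldl (scanStepB pat tbl p) (markAll cov ms p, j)
      = (markAll cov (l.foldl (scanStepA pat tbl p) (ms, j)).1 p,
         (l.foldl (scanStepA pat tbl p) (ms, j)).2) := by
  intro l
  induction l with
  | nil => intro j ms cov; rfl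
  | cons ci l ih =>
    intro j ms cov
    simp only [List.foldl_cons]
    by_cases h : kmpStep pat tbl j ci.1 = p
    · rw [show scanStepB pat tbl p (markAll cov ms p, j) ci
            = (markRange (markAll cov ms p) (ci.2 + 1 - p) p, tbl.getD (kmpStep pat tbl j ci.1 - 1) 0) from by
          simp only [scanStepB, markRange]; rw [if_pos h],
        show scanStepA pat tbl p (ms, j) ci
            = (ms ++ [ci.2 + 1 - p], tbl.getD (kmpStep pat tbl j ci.1 - 1) 0) from by
          simp only [scanStepA]; rw [if_pos h],
        ← markAll_append_singleton]
      exact ih _ _ _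
    · rw [show scanStepB pat tbl p (markAll cov ms p, j) ci = (markAll cov ms p, kmpStep pat tbl j ci.1) from by
          simp only [scanStepB]; rw [if_neg h],
        show scanStepA pat tbl p (ms, j) ci = (ms, kmpStep pat tbl j ci.1) from by
          simp only [scanStepA]; rw [if_neg h]]
      exact ih _ _ _

theorem scan_bounds (pat : List Char) (tbl : List Nat) (p n : Nat) (hpn : p ≤ n) :
    ∀ (l : List (Char × Nat)) (j : Nat) (ms : List Nat),
    (∀ s ∈ ms, s + p ≤ n) → (∀ x ∈ l, x.2 < n) →
    ∀ s ∈ (l.foldl (scanStepA pat tbl p) (ms, j)).1, s + p ≤ n := by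
  intro l
  induction l with
  | nil => intro j ms hms _ s hs; exact hms s hs
  | cons ci l ih =>
    intro j ms hms hl
    simp only [List.foldl_cons, scanStepA]
    have hci : ci.2 < n := hl ci (List.mem_cons_self ..)
    split_ifs with h
    · refine ih _ _ (fun s hs => ?_) (fun x hx => hl x (List.mem_cons_of_mem _ hx))
      rcases List.mem_append.mp hs with h1 | h1
      · exact hms s h1
      · have : s = ci.2 + 1 - p := by simpa using h1
        omega
    · exact ih _ _ hms (fun x hx => hl x (List.mem_cons_of_mem _ hx))

theorem get_covered_indices_py_spec' (text pattern : String) :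
    get_covered_indices_py text pattern = get_covered_indices_py_alt text pattern := by
  show (if pattern.toList.length > text.toList.length then List.replicate text.toList.length false
        else
          ((List.range text.toList.length).foldl
            (sumStep (((text.toList.zipIdx.foldl
                (scanStepA pattern.toList (buildPi pattern.toList) pattern.toList.length) ([], 0)).1).foldl
               (diffStep pattern.toList.length text.toList.length)
               (List.replicate (text.toList.length + 1) 0)))
            (List.replicate text.toList.length false, 0)).1)
      = (if pattern.toList.length > text.toList.length then List.replicate text.toList.length false
         else (text.toList.zipIdx.foldl
            (scanStepB pattern.toList (buildPi pattern.toList) pattern.toList.length)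
            (List.replicate text.toList.length false, 0)).1)
  set t := text.toList with ht
  set pat := pattern.toList with hpat
  set n := t.length with hn
  set p := pat.length with hp
  set tbl := buildPi pat with htbl
  split_ifs with hpn
  · rfl
  · have hpn' : p ≤ n := Nat.le_of_not_lt hpn
    set ms := (t.zipIdx.foldl (scanStepA pat tbl p) ([], 0)).1 with hms
    have hbounds : ∀ s ∈ ms, s + p ≤ n := by
      refine scan_bounds pat tbl p n hpn' t.zipIdx 0 [] (by simp) (fun x hx => ?_)
      have := List.mem_zipIdx hx
      omega
    set diff := ms.foldl (diffStep p n) (List.replicate (n + 1) 0) with hdiff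
    have hbridge := scan_bridge pat tbl p t.zipIdx 0 [] (List.replicate n false)
    have hB : (t.zipIdx.foldl (scanStepB pat tbl p) (List.replicate n false, 0)).1
        = markAll (List.replicate n false) ms p := by
      rw [show ((List.replicate n false, 0) : List Bool × Nat)
            = (markAll (List.replicate n false) [] p, 0) from rfl, hbridge]
    rw [hB]
    have hfin := final_fold diff n n
    have hps : ∀ m, psum diff m
        = (ms.countP (fun s => decide (s < m)) : Int) - (ms.countP (fun s => decide (s + p < m)) : Int) := by
      intro m
      rw [hdiff, diff_psum p n ms _ m hbounds (by simp), psum_replicate_zero]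
      ring
    apply List.ext_getElem
    · rw [hfin.2.1, markAll_length, List.length_replicate]
    · intro i hi1 hi2
      have hin : i < n := by rw [hfin.2.1] at hi1; exact hi1
      rw [← List.getD_eq_getElem _ false hi1, ← List.getD_eq_getElem _ false hi2]
      rw [hfin.2.2 i, markAll_getD, getD_replicate', if_pos hin, List.length_replicate]
      rw [Bool.false_or, decide_eq_decide]
      rw [hps (i+1), count_sub]
      constructor
      · rintro ⟨-, hcount, -⟩
        have : 0 < ms.countP (fun s => decide (s ≤ i ∧ i < s + p)) := by exact_mod_cast hcount
        obtain ⟨s, hsm, hs⟩ := List.countP_pos_iff.mp this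
        simp only [decide_eq_true_eq] at hs
        exact ⟨s, hsm, hs.1, hs.2, hin⟩
      · rintro ⟨s, hsm, h1, h2, -⟩
        refine ⟨hin, ?_, hin⟩
        have : 0 < ms.countP (fun s => decide (s ≤ i ∧ i < s + p)) :=
          List.countP_pos_iff.mpr ⟨s, hsm, by simp [h1, h2]⟩
        exact_mod_cast this

-- ===== VERDICT (by name: the statement is the Claim_ definition above) =====
theorem get_covered_indices_py_spec : Claim_equal_get_covered_indices_py := by
  intro text pattern _ _
  unfold Spec_get_covered_indices_py
  exact get_covered_indices_py_spec' text pattern
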